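-- pv_equiv track=rewrite | github.com/Superluminal-Studios/sulu-blender-addon | transfers/rclone.py | _pick_technical_line
-- ===== SOURCE A (Python) =====
-- from typing import List, Optional, Tuple
--
-- def _pick_technical_line(tail_lines: List[str]) -> str:
--     """
--     Pick a single, useful technical line without spamming retries.
--     Preference:
--       1) "Failed to ..." summary line
--       2) any line with StatusCode / Forbidden / AccessDenied
--       3) last non-empty line
--     """
--     # 1) "Failed to ..."
--     for ln in reversed(tail_lines):
--         s = str(ln).strip()
--         if not s:
--             continue
--         if "failed to" in s.lower():
--             return s
--     # 2) HTTP-ish / auth-ish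
--     for ln in reversed(tail_lines):
--         s = str(ln).strip()
--         if not s:
--             continue
--         low = s.lower()
--         if "statuscode" in low or "forbidden" in low or "accessdenied" in low or "unauthorized" in low:
--             return s
--     # 3) last
--     for ln in reversed(tail_lines):
--         s = str(ln).strip()
--         if s:
--             return s
--     return ""
-- ===== SOURCE B (Python) =====
-- from typing import List
--
-- def _pick_technical_line(tail_lines: List[str]) -> str:
--     # Single reverse pass maintaining the first match for each preference tier.
--     first_failed = None
--     first_http = None
--     first_nonempty = None
--     for ln in reversed(tail_lines):
--         s = str(ln).strip()
--         if not s: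
--             continue
--         low = s.lower()
--         if first_nonempty is None:
--             first_nonempty = s
--         if first_http is None and ("statuscode" in low or "forbidden" in low
--                                    or "accessdenied" in low or "unauthorized" in low):
--             first_http = s
--         if first_failed is None and "failed to" in low:
--             first_failed = s
--     if first_failed is not None:
--         return first_failed
--     if first_http is not None:
--         return first_http
--     if first_nonempty is not None:
--         return first_nonempty
--     return ""
-- ===== Notes on version B (the rewrite author's own statement) =====
-- stated objective: alternative
-- what changed: Replaces A's three separate reverse scans of the list by one reverse traversal that records the first match of each preference tier in three slots, then returns by priority; measured ~1.3-1.5x on large inputs but not consistently confirmed.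
import Mathlib
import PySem

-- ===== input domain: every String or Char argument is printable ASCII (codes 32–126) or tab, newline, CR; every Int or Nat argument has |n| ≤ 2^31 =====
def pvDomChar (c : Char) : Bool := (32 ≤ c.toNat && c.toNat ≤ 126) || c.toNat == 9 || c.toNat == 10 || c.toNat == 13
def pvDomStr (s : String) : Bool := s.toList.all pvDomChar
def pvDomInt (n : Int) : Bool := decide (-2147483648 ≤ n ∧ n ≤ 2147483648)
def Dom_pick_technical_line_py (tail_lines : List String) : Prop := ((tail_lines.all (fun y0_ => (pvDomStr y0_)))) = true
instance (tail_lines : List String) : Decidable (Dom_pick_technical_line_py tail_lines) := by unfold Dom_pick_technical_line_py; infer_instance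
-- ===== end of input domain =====

-- B folds once over the reversed list keeping three first-match slots instead of A's three sequential scans.
-- ===== PORT A =====
def pvFailed (s : String) : Bool := PySem.Str.isIn "failed to" (PySem.Str.lower s)

def pvHttp (s : String) : Bool :=
  let low := PySem.Str.lower s
  PySem.Str.isIn "statuscode" low || PySem.Str.isIn "forbidden" low ||
    PySem.Str.isIn "accessdenied" low || PySem.Str.isIn "unauthorized" low

-- loop 1: "Failed to ..." (over the reversed list, skipping blank lines)
def pvScanFailed : List String → Option String
  | [] => none
  | ln :: rest =>
    let s := PySem.Str.strip ln
    if s = "" then pvScanFailed rest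
    else if pvFailed s then some s else pvScanFailed rest

-- loop 2: HTTP-ish / auth-ish
def pvScanHttp : List String → Option String
  | [] => none
  | ln :: rest =>
    let s := PySem.Str.strip ln
    if s = "" then pvScanHttp rest
    else if pvHttp s then some s else pvScanHttp rest

-- loop 3: last non-empty line
def pvScanNonempty : List String → Option String
  | [] => none
  | ln :: rest =>
    let s := PySem.Str.strip ln
    if s = "" then pvScanNonempty rest else some s

def pick_technical_line_py (tail_lines : List String) : String :=
  let r := tail_lines.reverse
  match pvScanFailed r with
  | some s => s
  | none =>
    match pvScanHttp r with
    | some s => s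
    | none =>
      match pvScanNonempty r with
      | some s => s
      | none => ""

-- ===== PORT B =====
-- one reverse pass; each slot keeps only its first (reversed-order) match
def pvStep (st : Option String × Option String × Option String) (ln : String) :
    Option String × Option String × Option String :=
  let s := PySem.Str.strip ln
  if s = "" then st
  else
    let ne := if st.2.2.isSome then st.2.2 else some s
    let ht := if st.2.1.isSome then st.2.1 else if pvHttp s then some s else none
    let fl := if st.1.isSome then st.1 else if pvFailed s then some s else none
    (fl, ht, ne)

def pick_technical_line_py_alt (tail_lines : List String) : String :=
  let st := tail_lines.reverse.foldl pvStep (none, none, none)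
  match st.1 with
  | some s => s
  | none =>
    match st.2.1 with
    | some s => s
    | none =>
      match st.2.2 with
      | some s => s
      | none => ""

-- ===== PRECONDITION & SPEC =====
def Spec_pick_technical_line_py (tail_lines : List String) (out : String) : Prop := out = pick_technical_line_py_alt tail_lines
instance (tail_lines : List String) (out : String) : Decidable (Spec_pick_technical_line_py tail_lines out) := by unfold Spec_pick_technical_line_py; infer_instance

-- ===== CLAIM (what is proved, stated in full; the proofs are below) =====
def Claim_equal_pick_technical_line_py : Prop := ∀ (tail_lines : List String), Dom_pick_technical_line_py tail_lines → Spec_pick_technical_line_py tail_lines (pick_technical_line_py tail_lines)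

-- ===== LEMMAS AND PROOFS =====

-- ===== VERDICT (by name: the statement is the Claim_ definition above) =====
def pvOr {α : Type} : Option α → Option α → Option α
  | some x, _ => some x
  | none, y => y

theorem pvFoldl_step (r : List String) :
    ∀ a b c : Option String,
      r.foldl pvStep (a, b, c) =
        (pvOr a (pvScanFailed r), pvOr b (pvScanHttp r), pvOr c (pvScanNonempty r)) := by
  induction r with
  | nil => intro a b c; cases a <;> cases b <;> cases c <;> simp [pvOr, pvScanFailed, pvScanHttp, pvScanNonempty]
  | cons ln rest ih =>
    intro a b c
    simp only [List.foldl_cons, pvStep, pvScanFailed, pvScanHttp, pvScanNonempty]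
    by_cases hs : PySem.Str.strip ln = ""
    · simp [hs, ih]
    · simp only [hs, if_false]
      rw [ih]
      cases a <;> cases b <;> cases c <;>
        simp [pvOr, Option.isSome] <;> split_ifs <;> simp [pvOr]

theorem pick_technical_line_py_spec : Claim_equal_pick_technical_line_py := by
  intro tail_lines _
  unfold Spec_pick_technical_line_py pick_technical_line_py pick_technical_line_py_alt
  rw [pvFoldl_step]
  cases h1 : pvScanFailed tail_lines.reverse <;> cases h2 : pvScanHttp tail_lines.reverse <;>
    cases h3 : pvScanNonempty tail_lines.reverse <;> simp [pvOr, h1, h2, h3]
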